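-- pv_equiv track=rewrite | github.com/daniyal89/Query_builderv3 | backend/services/query_builder_service.py | _split_column_ref
-- ===== SOURCE A (Python) =====
-- def _split_column_ref(
--     column_ref: str,
--     default_table: str,
--     known_tables: list[str] | None = None,
-- ) -> tuple[str, str]:
--     normalized = column_ref.strip()
--     if not normalized:
--         raise ValueError("Column references cannot be empty.")
--     if known_tables:
--         for table_name in sorted(known_tables, key=len, reverse=True):
--             prefix = f"{table_name}."
--             if normalized.startswith(prefix):
--                 column_name = normalized[len(prefix) :].strip()
--                 if not column_name:
--                     raise ValueError(f"Invalid column reference '{column_ref}'.")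
--                 return table_name.strip(), column_name
--     if "." in normalized:
--         table_name, column_name = normalized.rsplit(".", 1)
--     else:
--         table_name, column_name = default_table, normalized
--     if not table_name.strip() or not column_name.strip():
--         raise ValueError(f"Invalid column reference '{column_ref}'.")
--     return table_name.strip(), column_name.strip()
-- ===== SOURCE B (Python) =====
-- def _split_column_ref(
--     column_ref: str,
--     default_table: str,
--     known_tables: list[str] | None = None,
-- ) -> tuple[str, str]:
--     normalized = column_ref.strip()
--     if not normalized:
--         raise ValueError("Column references cannot be empty.")
--     best = None
--     for table_name in known_tables or []:
--         if normalized.startswith(table_name + ".") and (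
--             best is None or len(table_name) > len(best)
--         ):
--             best = table_name
--     if best is not None:
--         column_name = normalized[len(best) + 1 :].strip()
--         if not column_name:
--             raise ValueError(f"Invalid column reference '{column_ref}'.")
--         return best.strip(), column_name
--     if "." in normalized:
--         table_name, column_name = normalized.rsplit(".", 1)
--     else:
--         table_name, column_name = default_table, normalized
--     if not table_name.strip() or not column_name.strip():
--         raise ValueError(f"Invalid column reference '{column_ref}'.")
--     return table_name.strip(), column_name.strip()
-- ===== Notes on version B (the rewrite author's own statement) =====
-- stated objective: simpler
-- what changed: A sorts known_tables by length descending and returns the first table whose 'table.' prefixes the reference; B drops the sort and does one linear pass keeping the longest matching table, then builds the same result.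
import Mathlib
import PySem

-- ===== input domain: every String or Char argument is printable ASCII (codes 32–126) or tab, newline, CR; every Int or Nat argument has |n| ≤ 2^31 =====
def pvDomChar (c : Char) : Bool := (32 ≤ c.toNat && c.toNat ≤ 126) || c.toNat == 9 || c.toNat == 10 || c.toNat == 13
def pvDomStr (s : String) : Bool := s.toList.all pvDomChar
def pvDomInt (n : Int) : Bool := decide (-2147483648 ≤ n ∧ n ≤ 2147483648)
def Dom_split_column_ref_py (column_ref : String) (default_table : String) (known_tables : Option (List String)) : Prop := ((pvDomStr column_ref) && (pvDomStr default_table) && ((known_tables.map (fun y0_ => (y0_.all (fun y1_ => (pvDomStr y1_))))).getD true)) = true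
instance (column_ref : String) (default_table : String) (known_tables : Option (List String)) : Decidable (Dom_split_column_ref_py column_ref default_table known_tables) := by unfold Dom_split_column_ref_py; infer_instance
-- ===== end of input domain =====

-- B replaces A's sort-by-length-descending + first-startswith-match loop by a single
-- linear pass keeping the longest matching table prefix (objective: simpler, no sort).
-- A and B raise ValueError on the same inputs; those inputs are outside Pre_.

-- shared primitive helper: normalized.rsplit(".", 1), exact whenever '.' occurs in cs
-- (the only case in which either program uses it)
def pvRsplitDot1 (cs : List Char) : List Char × List Char :=
  (((cs.reverse.dropWhile (· ≠ '.')).drop 1).reverse, (cs.reverse.takeWhile (· ≠ '.')).reverse)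

-- ===== PORT A =====
-- the `for table_name in sorted(known_tables, key=len, reverse=True): …` loop
def pvLoopA (n : String) : List String → Option (String × String)
  | [] => none
  | t :: rest =>
    if PySem.Str.startswith n (t ++ ".") then
      let column_name := PySem.Str.strip (PySem.Str.slice n (some ((PySem.Str.len (t ++ ".") : Int))) none)
      if column_name = "" then some ("", "")  -- raise ValueError; outside Pre_
      else some (PySem.Str.strip t, column_name)
    else pvLoopA n rest

def split_column_ref_py (column_ref : String) (default_table : String) (known_tables : Option (List String)) : String × String :=
  let normalized := PySem.Str.strip column_ref
  if normalized = "" then ("", "")  -- raise ValueError; outside Pre_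
  else
    let kt := known_tables.getD []
    match (if kt.isEmpty then none
           else pvLoopA normalized (PySem.List.sorted kt PySem.Str.len true)) with
    | some r => r
    | none =>
      let tc :=
        if PySem.Str.isIn "." normalized then
          let p := pvRsplitDot1 normalized.toList
          (String.ofList p.1, String.ofList p.2)
        else (default_table, normalized)
      if PySem.Str.strip tc.1 = "" ∨ PySem.Str.strip tc.2 = "" then ("", "")  -- raise ValueError; outside Pre_
      else (PySem.Str.strip tc.1, PySem.Str.strip tc.2)

-- ===== PORT B =====
-- `best = None; for t in known_tables or []: if normalized.startswith(t+".") and (best is None or len(t) > len(best)): best = t`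
def pvBestB (n : String) (best : Option String) : List String → Option String
  | [] => best
  | t :: rest =>
      pvBestB n
        (if PySem.Str.startswith n (t ++ ".") &&
            (best.isNone || best.any (fun b => decide (PySem.Str.len b < PySem.Str.len t)))
         then some t else best) rest

def split_column_ref_py_alt (column_ref : String) (default_table : String) (known_tables : Option (List String)) : String × String :=
  let normalized := PySem.Str.strip column_ref
  if normalized = "" then ("", "")  -- raise ValueError; outside Pre_
  else
    match pvBestB normalized none (known_tables.getD []) with
    | some b =>
      let column_name := PySem.Str.strip (PySem.Str.slice normalized (some ((PySem.Str.len b : Int) + 1)) none)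
      if column_name = "" then ("", "")  -- raise ValueError; outside Pre_
      else (PySem.Str.strip b, column_name)
    | none =>
      let tc :=
        if PySem.Str.isIn "." normalized then
          let p := pvRsplitDot1 normalized.toList
          (String.ofList p.1, String.ofList p.2)
        else (default_table, normalized)
      if PySem.Str.strip tc.1 = "" ∨ PySem.Str.strip tc.2 = "" then ("", "")  -- raise ValueError; outside Pre_
      else (PySem.Str.strip tc.1, PySem.Str.strip tc.2)

-- ===== PRECONDITION & SPEC =====
-- Pre_ is exactly "A returns normally": the stripped reference is nonempty; if some known
-- table (plus '.') prefixes it, the longest such table leaves a nonempty column part;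
-- otherwise the rsplit/default fallback yields a nonempty table part and column part.
def Pre_split_column_ref_py (column_ref : String) (default_table : String) (known_tables : Option (List String)) : Prop :=
  let n := PySem.Str.strip column_ref
  let kt := known_tables.getD []
  n ≠ "" ∧
  ((∃ t ∈ kt, PySem.Str.startswith n (t ++ ".") = true) →
     ∀ t ∈ kt, PySem.Str.startswith n (t ++ ".") = true →
       (∀ t' ∈ kt, PySem.Str.startswith n (t' ++ ".") = true → PySem.Str.len t' ≤ PySem.Str.len t) →
       PySem.Str.strip (PySem.Str.slice n (some ((PySem.Str.len t : Int) + 1)) none) ≠ "") ∧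
  ((¬ ∃ t ∈ kt, PySem.Str.startswith n (t ++ ".") = true) →
     (if PySem.Str.isIn "." n
      then PySem.Str.strip (String.ofList (pvRsplitDot1 n.toList).1) ≠ "" ∧
           PySem.Str.strip (String.ofList (pvRsplitDot1 n.toList).2) ≠ ""
      else PySem.Str.strip default_table ≠ ""))

instance (column_ref : String) (default_table : String) (known_tables : Option (List String)) : Decidable (Pre_split_column_ref_py column_ref default_table known_tables) := by unfold Pre_split_column_ref_py; infer_instance

def pvWitness_split_column_ref_py : String × String × Option (List String) :=
  ("users.name", "orders", some ["users"])

def Spec_split_column_ref_py (column_ref : String) (default_table : String) (known_tables : Option (List String)) (out : String × String) : Prop := out = split_column_ref_py_alt column_ref default_table known_tables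
instance (column_ref : String) (default_table : String) (known_tables : Option (List String)) (out : String × String) : Decidable (Spec_split_column_ref_py column_ref default_table known_tables out) := by unfold Spec_split_column_ref_py; infer_instance

-- ===== CLAIM (what is proved, stated in full; the proofs are below) =====
def Claim_equal_split_column_ref_py : Prop := ∀ (column_ref : String) (default_table : String) (known_tables : Option (List String)), Dom_split_column_ref_py column_ref default_table known_tables → Pre_split_column_ref_py column_ref default_table known_tables → Spec_split_column_ref_py column_ref default_table known_tables (split_column_ref_py column_ref default_table known_tables)

-- ===== LEMMAS AND PROOFS =====

-- A's loop is find? on the sorted list, mapped through the result builder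
theorem pvLoopA_eq_find (n : String) (l : List String) :
    pvLoopA n l =
      (l.find? (fun t => PySem.Str.startswith n (t ++ "."))).map
        (fun t =>
          let column_name := PySem.Str.strip (PySem.Str.slice n (some ((PySem.Str.len (t ++ ".") : Int))) none)
          if column_name = "" then ("", "") else (PySem.Str.strip t, column_name)) := by
  induction l with
  | nil => rfl
  | cons t rest ih =>
    cases h : PySem.Chars.startswith n.toList (t.toList ++ ['.']) with
    | true =>
      simp [pvLoopA, List.find?, h]
      exact (apply_ite some _ _ _).symm
    | false => simp [pvLoopA, List.find?, h, ih]

-- on a key-descending list, find? returns a match of maximal key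
theorem pv_find_desc {α : Type} (key : α → Int) (pred : α → Bool) :
    ∀ (l : List α), l.Pairwise (fun a b => key b ≤ key a) →
      ∀ m, l.find? pred = some m → ∀ t ∈ l, pred t = true → key t ≤ key m := by
  intro l
  induction l with
  | nil => intro _ m hm; simp [List.find?] at hm
  | cons a l ih =>
    intro hp m hm t ht hpt
    rcases List.pairwise_cons.mp hp with ⟨ha, hl⟩
    by_cases hpa : pred a = true
    · rw [List.find?_cons_of_pos hpa] at hm
      cases hm
      rcases List.mem_cons.mp ht with rfl | htl
      · exact le_refl _
      · exact ha t htl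
    · rw [List.find?_cons_of_neg (by simpa using hpa)] at hm
      rcases List.mem_cons.mp ht with rfl | htl
      · exact absurd hpt hpa
      · exact ih hl m hm t htl hpt

-- B's scan: a found best is a match of maximal length (invariant over the accumulator)
theorem pvBestB_some_spec (n : String) :
    ∀ (l : List String) (acc : Option String) (m : String),
      (∀ b, acc = some b → PySem.Str.startswith n (b ++ ".") = true) →
      pvBestB n acc l = some m →
      PySem.Str.startswith n (m ++ ".") = true ∧
      (∀ t ∈ l, PySem.Str.startswith n (t ++ ".") = true → PySem.Str.len t ≤ PySem.Str.len m) ∧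
      (∀ b, acc = some b → PySem.Str.len b ≤ PySem.Str.len m) := by
  intro l
  induction l with
  | nil =>
    intro acc m hacc h
    simp only [pvBestB] at h
    exact ⟨hacc m h, by simp, fun b hb => by rw [hb] at h; cases h; exact le_refl _⟩
  | cons t rest ih =>
    intro acc m hacc h
    simp only [pvBestB] at h
    cases acc with
    | none =>
      simp only [Option.isNone_none, Bool.true_or, Bool.and_true] at h
      cases hpt : PySem.Str.startswith n (t ++ ".") with
      | true =>
        rw [hpt, if_pos rfl] at h
        rcases ih (some t) m (fun b hb => by cases hb; exact hpt) h with ⟨hm, hrest, hlt⟩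
        refine ⟨hm, ?_, fun b hb => by cases hb⟩
        intro u hu hpu
        rcases List.mem_cons.mp hu with rfl | hur
        · exact hlt _ rfl
        · exact hrest u hur hpu
      | false =>
        rw [hpt, if_neg Bool.false_ne_true] at h
        rcases ih none m (fun b hb => by cases hb) h with ⟨hm, hrest, _⟩
        refine ⟨hm, ?_, fun b hb => by cases hb⟩
        intro u hu hpu
        rcases List.mem_cons.mp hu with rfl | hur
        · rw [hpt] at hpu; cases hpu
        · exact hrest u hur hpu
    | some b0 =>
      simp only [Option.isNone_some, Bool.false_or, Option.any_some] at h
      cases hpt : PySem.Str.startswith n (t ++ ".") with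
      | true =>
        rw [hpt, Bool.true_and] at h
        by_cases hlt : PySem.Str.len b0 < PySem.Str.len t
        · rw [decide_eq_true hlt, if_pos rfl] at h
          rcases ih (some t) m (fun b hb => by cases hb; exact hpt) h with ⟨hm, hrest, hltm⟩
          refine ⟨hm, ?_, ?_⟩
          · intro u hu hpu
            rcases List.mem_cons.mp hu with rfl | hur
            · exact hltm _ rfl
            · exact hrest u hur hpu
          · intro b hb
            cases hb
            exact le_of_lt (lt_of_lt_of_le hlt (hltm _ rfl))
        · rw [decide_eq_false hlt, if_neg Bool.false_ne_true] at h
          rcases ih (some b0) m hacc h with ⟨hm, hrest, hleb⟩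
          refine ⟨hm, ?_, hleb⟩
          intro u hu hpu
          rcases List.mem_cons.mp hu with rfl | hur
          · exact le_trans (le_of_not_gt hlt) (hleb b0 rfl)
          · exact hrest u hur hpu
      | false =>
        rw [hpt, Bool.false_and, if_neg Bool.false_ne_true] at h
        rcases ih (some b0) m hacc h with ⟨hm, hrest, hleb⟩
        refine ⟨hm, ?_, hleb⟩
        intro u hu hpu
        rcases List.mem_cons.mp hu with rfl | hur
        · rw [hpt] at hpu; cases hpu
        · exact hrest u hur hpu

-- B's scan returns none exactly when nothing matched
theorem pvBestB_none_iff (n : String) :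
    ∀ (l : List String) (acc : Option String),
      pvBestB n acc l = none ↔
        acc = none ∧ ∀ t ∈ l, ¬ PySem.Str.startswith n (t ++ ".") = true := by
  intro l
  induction l with
  | nil => intro acc; simp [pvBestB]
  | cons t rest ih =>
    intro acc
    simp only [pvBestB]
    constructor
    · intro h
      rcases (ih _).mp h with ⟨hacc, hrest⟩
      cases hpt : PySem.Str.startswith n (t ++ ".") with
      | true =>
        exfalso
        cases acc with
        | none =>
          rw [hpt] at hacc
          simp at hacc
        | some b =>
          rw [hpt] at hacc
          simp only [Option.isNone_some, Bool.false_or, Option.any_some, Bool.true_and] at hacc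
          by_cases hlt : PySem.Str.len b < PySem.Str.len t
          · rw [decide_eq_true hlt, if_pos rfl] at hacc; cases hacc
          · rw [decide_eq_false hlt, if_neg Bool.false_ne_true] at hacc; cases hacc
      | false =>
        refine ⟨?_, ?_⟩
        · rw [hpt, Bool.false_and, if_neg Bool.false_ne_true] at hacc
          exact hacc
        · intro u hu
          rcases List.mem_cons.mp hu with rfl | hur
          · intro hc; rw [hpt] at hc; cases hc
          · exact hrest u hur
    · rintro ⟨hacc, hall⟩
      subst hacc
      have hpt : PySem.Str.startswith n (t ++ ".") = false := by
        cases hc : PySem.Str.startswith n (t ++ ".") with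
        | true => exact absurd hc (hall t List.mem_cons_self)
        | false => rfl
      refine (ih _).mpr ⟨?_, fun u hu => hall u (List.mem_cons_of_mem _ hu)⟩
      rw [hpt, Bool.false_and, if_neg Bool.false_ne_true]

-- a found best comes from the list (or was already the accumulator)
theorem pv_bestB_mem (n : String) :
    ∀ (l : List String) (acc : Option String) (m : String),
      pvBestB n acc l = some m → m ∈ l ∨ acc = some m := by
  intro l
  induction l with
  | nil => intro acc m h; exact Or.inr h
  | cons t rest ih =>
    intro acc m h
    simp only [pvBestB] at h
    cases hcond : (PySem.Str.startswith n (t ++ ".") &&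
        (acc.isNone || acc.any (fun b => decide (PySem.Str.len b < PySem.Str.len t)))) with
    | true =>
      rw [hcond, if_pos rfl] at h
      rcases ih (some t) m h with hm | hm
      · exact Or.inl (List.mem_cons_of_mem _ hm)
      · cases hm; exact Or.inl List.mem_cons_self
    | false =>
      rw [hcond, if_neg Bool.false_ne_true] at h
      rcases ih acc m h with hm | hm
      · exact Or.inl (List.mem_cons_of_mem _ hm)
      · exact Or.inr hm

-- two tables (plus '.') prefixing the same string with equal lengths are equal
theorem pv_match_uniq (n t t' : String)
    (ht : PySem.Str.startswith n (t ++ ".") = true)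
    (ht' : PySem.Str.startswith n (t' ++ ".") = true)
    (hlen : PySem.Str.len t = PySem.Str.len t') : t = t' := by
  have h1 : (t ++ ".").toList <+: n.toList := by
    have hb := PySem.Chars.startswith_iff (s := n.toList) (p := (t ++ ".").toList)
    simp only [PySem.Str.startswith_eq] at ht
    exact hb.mp ht
  have h2 : (t' ++ ".").toList <+: n.toList := by
    have hb := PySem.Chars.startswith_iff (s := n.toList) (p := (t' ++ ".").toList)
    simp only [PySem.Str.startswith_eq] at ht'
    exact hb.mp ht'
  have p1 : t.toList <+: n.toList :=
    List.IsPrefix.trans (by simp [List.prefix_append]) h1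
  have p2 : t'.toList <+: n.toList :=
    List.IsPrefix.trans (by simp [List.prefix_append]) h2
  have h0 : ((t.toList.length : Int)) = ((t'.toList.length : Int)) := by
    simpa [PySem.Str.len_eq] using hlen
  have hl : t.toList.length = t'.toList.length := by exact_mod_cast h0
  rw [List.prefix_iff_eq_take] at p1 p2
  have hts : t.toList = t'.toList := by rw [p1, p2, hl]
  have := congrArg String.ofList hts
  simpa using this

-- the two option results agree, pointwise mapped to the built pairs
theorem pv_options_agree (n : String) (kt : List String) :
    (if kt.isEmpty then none
     else pvLoopA n (PySem.List.sorted kt PySem.Str.len true)) =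
      (pvBestB n none kt).map
        (fun b =>
          let column_name := PySem.Str.strip (PySem.Str.slice n (some ((PySem.Str.len b : Int) + 1)) none)
          if column_name = "" then ("", "") else (PySem.Str.strip b, column_name)) := by
  by_cases hkt : kt.isEmpty
  · have : kt = [] := List.isEmpty_iff.mp hkt
    subst this
    simp [pvBestB]
  · rw [if_neg hkt, pvLoopA_eq_find]
    cases hfind : (PySem.List.sorted kt PySem.Str.len true).find?
        (fun t => PySem.Str.startswith n (t ++ ".")) with
    | none =>
      have hno : ∀ t ∈ PySem.List.sorted kt PySem.Str.len true,
          ¬ PySem.Str.startswith n (t ++ ".") = true := by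
        intro t ht
        have := List.find?_eq_none.mp hfind t ht
        simpa using this
      have hnone : pvBestB n none kt = none := by
        refine (pvBestB_none_iff n kt none).mpr ⟨rfl, fun t ht => ?_⟩
        exact hno t ((PySem.List.mem_sorted kt PySem.Str.len true t).mpr ht)
      simp [hnone]
    | some m =>
      have hpm : PySem.Str.startswith n (m ++ ".") = true := by
        have := List.find?_some hfind
        simpa using this
      have hmem : m ∈ kt :=
        (PySem.List.mem_sorted kt PySem.Str.len true m).mp (List.mem_of_find?_eq_some hfind)
      have hmax : ∀ t ∈ kt, PySem.Str.startswith n (t ++ ".") = true →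
          PySem.Str.len t ≤ PySem.Str.len m := by
        intro t ht hpt
        exact pv_find_desc PySem.Str.len (fun t => PySem.Str.startswith n (t ++ "."))
          (PySem.List.sorted kt PySem.Str.len true)
          (PySem.List.sorted_pairwise_rev kt PySem.Str.len)
          m hfind t ((PySem.List.mem_sorted kt PySem.Str.len true t).mpr ht) hpt
      cases hbest : pvBestB n none kt with
      | none =>
        exfalso
        exact ((pvBestB_none_iff n kt none).mp hbest).2 m hmem hpm
      | some b =>
        rcases pvBestB_some_spec n kt none b (fun _ hb => by cases hb) hbest with ⟨hpb, hbmax, _⟩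
        have hbmem : b ∈ kt := by
          rcases pv_bestB_mem n kt none b hbest with h | h
          · exact h
          · cases h
        have hlen : PySem.Str.len m = PySem.Str.len b :=
          le_antisymm (hbmax m hmem hpm) (hmax b hbmem hpb)
        have hmb : m = b := pv_match_uniq n m b hpm hpb hlen
        subst hmb
        simp only [Option.map_some]
        have hlen1 : PySem.Str.len (m ++ ".") = PySem.Str.len m + 1 := by simp
        rw [hlen1]

-- ===== VERDICT (by name: the statement is the Claim_ definition above) =====
theorem split_column_ref_py_spec : Claim_equal_split_column_ref_py := by
  intro column_ref default_table known_tables _ _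
  unfold Spec_split_column_ref_py split_column_ref_py split_column_ref_py_alt
  by_cases hn : PySem.Str.strip column_ref = ""
  · simp [hn]
  · simp only [hn]
    rw [pv_options_agree]
    cases pvBestB (PySem.Str.strip column_ref) none (known_tables.getD []) with
    | none => rfl
    | some b => rfl
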